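-- pv_equiv track=rewrite | github.com/20130353/Leetcode | target_offer/dfs+动态规划/背包/糖果游戏--数字.py | solution
-- ===== SOURCE A (Python) =====
-- def solution(arr, n):
--     vis = [0] * n
--     max_vlaue = max(arr)
--     inx = arr.index(max_vlaue)
--     suma = [max_vlaue, 0]
--     vis[inx] = 1
--     count = 1
--     i, j = inx - 1, inx + 1
--     while count != n:
--         i = n - 1 if i == -1 else i
--         j = 0 if j == n else j
--
--         while vis[i] != 0:
--             i -= 1
--             i = n - 1 if i == -1 else i
--
--         while vis[j] != 0 and count != n - 1:
--             j += 1
--             j = 0 if j == n else j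
--
--         if arr[i] >= arr[j] or count == n - 1:
--             select = i
--             i -= 1
--         else:
--             select = j
--             j += 1
--
--         suma[count & 1] += arr[select]
--         vis[select] = 1
--         count += 1
--     return suma[0] - suma[1]
-- ===== SOURCE B (Python) =====
-- def solution(arr, n):
--     w = [arr[k] for k in range(n)]
--     m = max(w)
--     inx = w.index(m)
--     d = w[inx + 1:] + w[:inx]
--     suma = [m, 0]
--     count = 1
--     while d:
--         if len(d) == 1 or d[-1] >= d[0]:
--             x = d.pop()
--         else:
--             x = d.pop(0)
--         suma[count & 1] += x
--         count += 1
--     return suma[0] - suma[1]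
-- ===== Notes on version B (the rewrite author's own statement) =====
-- stated objective: simpler
-- what changed: Replaces the vis array, circular wrap arithmetic and both skip-while loops with a single pass that rotates the remaining candies of the n-window into a linear list once and then pops from its back (counterclockwise side) or front (clockwise side).
import Mathlib
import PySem

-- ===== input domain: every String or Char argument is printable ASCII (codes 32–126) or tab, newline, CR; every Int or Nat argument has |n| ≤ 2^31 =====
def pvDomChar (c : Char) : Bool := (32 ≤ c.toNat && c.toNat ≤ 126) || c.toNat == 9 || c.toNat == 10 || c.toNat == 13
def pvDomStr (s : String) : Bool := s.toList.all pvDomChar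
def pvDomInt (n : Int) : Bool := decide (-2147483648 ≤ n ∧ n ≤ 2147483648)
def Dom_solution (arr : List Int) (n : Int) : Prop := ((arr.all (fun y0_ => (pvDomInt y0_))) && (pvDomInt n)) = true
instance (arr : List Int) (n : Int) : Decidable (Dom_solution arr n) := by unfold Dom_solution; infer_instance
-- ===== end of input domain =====

-- B replaces A's vis array, circular wrap arithmetic and skip-while loops by one pass
-- popping from the two ends of the rotated remainder list (objective: simpler).

-- ===== PORT A =====
-- inner `while vis[i] != 0` loop; fuel n.toNat suffices inside Pre_ (some entry is 0);
-- vis[i] read with pyGetD: exact since i is in range whenever the loop runs inside Pre_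
def skipI (vis : List Int) (n : Int) (i : Int) : Nat → Int
  | 0 => i
  | f + 1 =>
    if PySem.List.pyGetD vis i 0 ≠ 0 then
      let i' := i - 1
      skipI vis n (if i' = -1 then n - 1 else i') f
    else i

-- inner `while vis[j] != 0 and count != n - 1` loop
def skipJ (vis : List Int) (n : Int) (count : Int) (j : Int) : Nat → Int
  | 0 => j
  | f + 1 =>
    if PySem.List.pyGetD vis j 0 ≠ 0 ∧ count ≠ n - 1 then
      let j' := j + 1
      skipJ vis n count (if j' = n then 0 else j') f
    else j

-- outer `while count != n` loop; fuel n.toNat ≥ number of iterations inside Pre_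
def loopA (arr : List Int) (n : Int) :
    List Int → Int → Int → Int → Int → Int → Nat → Int
  | _, s0, s1, _, _, _, 0 => s0 - s1
  | vis, s0, s1, count, i, j, f + 1 =>
    if count = n then s0 - s1
    else
      let i := if i = -1 then n - 1 else i
      let j := if j = n then 0 else j
      let i := skipI vis n i n.toNat
      let j := skipJ vis n count j n.toNat
      let r := if PySem.List.pyGetD arr i 0 ≥ PySem.List.pyGetD arr j 0 ∨ count = n - 1
               then (i, i - 1, j) else (j, i, j + 1)
      let sel := r.1
      let i := r.2.1
      let j := r.2.2
      let x := PySem.List.pyGetD arr sel 0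
      -- suma[count & 1] += arr[select]; count ≥ 1 inside Pre_, so count & 1 = count % 2
      let s0 := if count % 2 = 1 then s0 else s0 + x
      let s1 := if count % 2 = 1 then s1 + x else s1
      loopA arr n (PySem.List.pySetD vis sel 1) s0 s1 (count + 1) i j f

def solution (arr : List Int) (n : Int) : Int :=
  match PySem.List.max? arr (fun y => y) with
  | none => 0          -- max([]) raises ValueError: excluded by Pre_
  | some mx =>
    match PySem.List.index? arr mx with
    | none => 0        -- unreachable: mx ∈ arr
    | some inx =>
      -- vis = [0]*n; vis[inx] = 1  (raises unless inx < n: inside Pre_ it is)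
      let vis := PySem.List.pySetD (List.replicate n.toNat (0 : Int)) (inx : Int) 1
      loopA arr n vis mx 0 1 ((inx : Int) - 1) ((inx : Int) + 1) n.toNat

-- ===== PORT B =====
-- the while-d loop of Source B: pop back (if single or d[-1] >= d[0]) else pop front
def loopB : List Int → Int → Int → Int → Int
  | [], s0, s1, _ => s0 - s1
  | x :: t, s0, s1, count =>
    let b := (x :: t).getLast (List.cons_ne_nil x t)      -- d[-1]
    if t = [] ∨ b ≥ x then                                -- len(d) == 1 or d[-1] >= d[0]
      -- x = d.pop(); suma[count & 1] += x  (count ≥ 1, so count & 1 = count % 2)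
      loopB (x :: t).dropLast (if count % 2 = 1 then s0 else s0 + b)
            (if count % 2 = 1 then s1 + b else s1) (count + 1)
    else
      -- x = d.pop(0)
      loopB t (if count % 2 = 1 then s0 else s0 + x)
            (if count % 2 = 1 then s1 + x else s1) (count + 1)
  termination_by d _ _ _ => d.length
  decreasing_by · simp [List.length_dropLast]
                · simp

def solution_alt (arr : List Int) (n : Int) : Int :=
  -- w = [arr[k] for k in range(n)]; arr[k] read with pyGetD, exact whenever k is in
  -- range, which holds inside Pre_ (outside it the Python raises IndexError)
  let w := (PySem.List.pyRange 0 n).map (fun k => PySem.List.pyGetD arr k 0)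
  match PySem.List.max? w (fun y => y) with
  | none => 0          -- max([]) raises: excluded by Pre_
  | some mx =>
    match PySem.List.index? w mx with
    | none => 0        -- unreachable: mx ∈ w
    | some inx =>
      let d := PySem.List.slice w (some ((inx : Int) + 1)) none
               ++ PySem.List.slice w none (some (inx : Int))
      loopB d mx 0 1

-- ===== PRECONDITION & SPEC =====
-- exactly the inputs on which A returns: arr nonempty (max([]) raises ValueError),
-- 1 ≤ n ≤ len(arr) and the first occurrence of the maximum lies among the first n
-- elements (otherwise vis[inx] = 1 or an arr[i] read raises IndexError)
def Pre_solution (arr : List Int) (n : Int) : Prop :=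
  arr ≠ [] ∧ 1 ≤ n ∧ n ≤ arr.length ∧ ∃ y ∈ arr.take n.toNat, ∀ x ∈ arr, x ≤ y
instance (arr : List Int) (n : Int) : Decidable (Pre_solution arr n) := by
  unfold Pre_solution; infer_instance
def pvWitness_solution : List Int × Int := ([3, 1, 4, 2], 4)

def Spec_solution (arr : List Int) (n : Int) (out : Int) : Prop := out = solution_alt arr n
instance (arr : List Int) (n : Int) (out : Int) : Decidable (Spec_solution arr n out) := by
  unfold Spec_solution; infer_instance

-- ===== CLAIM (what is proved, stated in full; the proofs are below) =====
def Claim_equal_solution : Prop := ∀ (arr : List Int) (n : Int), Dom_solution arr n → Pre_solution arr n → Spec_solution arr n (solution arr n)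

-- ===== LEMMAS AND PROOFS =====

-- position on the circle of the t-th remaining candy after the rotation point inx
def pvPos (inx L t : Nat) : Nat := if inx + 1 + t < L then inx + 1 + t else inx + 1 + t - L

lemma pvPos_lt (inx L t : Nat) (h1 : inx < L) (h2 : t < L - 1) : pvPos inx L t < L := by
  unfold pvPos; split_ifs <;> omega

lemma pvPos_ne (inx L t : Nat) (h1 : inx < L) (h2 : t < L - 1) : pvPos inx L t ≠ inx := by
  unfold pvPos; split_ifs <;> omega

lemma pvPos_inj (inx L t s : Nat) (h1 : inx < L) (ht : t < L - 1) (hs : s < L - 1)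
    (h : pvPos inx L t = pvPos inx L s) : t = s := by
  unfold pvPos at h; split_ifs at h <;> omega

lemma pvPos_pred (inx L t : Nat) (h1 : inx < L) (h2 : t < L - 1) (h3 : 1 ≤ t) :
    (if (pvPos inx L t : Int) - 1 = -1 then (L : Int) - 1 else (pvPos inx L t : Int) - 1)
      = (pvPos inx L (t - 1) : Int) := by
  unfold pvPos; split_ifs <;> omega

lemma pvPos_succ (inx L t : Nat) (h1 : inx < L) (h2 : t + 1 < L - 1) :
    (if (pvPos inx L t : Int) + 1 = (L : Int) then 0 else (pvPos inx L t : Int) + 1)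
      = (pvPos inx L (t + 1) : Int) := by
  unfold pvPos; split_ifs <;> omega

lemma pvPos_id (inx L t : Nat) (h1 : inx < L) (h2 : t < L - 1) :
    (if (pvPos inx L t : Int) = (L : Int) then 0 else (pvPos inx L t : Int))
      = (pvPos inx L t : Int) := by
  have hlt := pvPos_lt inx L t h1 h2
  rw [if_neg (by omega)]

lemma pvPos_nonneg_if (inx L t : Nat) :
    (if (pvPos inx L t : Int) = -1 then (L : Int) - 1 else (pvPos inx L t : Int))
      = (pvPos inx L t : Int) := by
  rw [if_neg (by omega)]

-- e = arr[inx+1:] + arr[:inx] read at t is arr read at the circular position pvPos t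
lemma pvE_getD (arr : List Int) (inx t L : Nat) (h1 : inx < L) (hLle : L ≤ arr.length)
    (h2 : t < L - 1) :
    ((arr.drop (inx + 1)).take (L - (inx + 1)) ++ arr.take inx).getD t 0
      = arr.getD (pvPos inx L t) 0 := by
  have hlen : ((arr.drop (inx + 1)).take (L - (inx + 1)) ++ arr.take inx).length = L - 1 := by
    simp; omega
  have hp : pvPos inx L t < L := pvPos_lt inx L t h1 h2
  rw [List.getD_eq_getElem _ _ (by omega), List.getD_eq_getElem _ _ (by omega)]
  by_cases hc : t < L - 1 - inx
  · rw [List.getElem_append_left (by simp; omega)]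
    simp only [List.getElem_take, List.getElem_drop]
    congr 1
    unfold pvPos; split_ifs <;> omega
  · rw [List.getElem_append_right (by simp; omega)]
    simp only [List.getElem_take]
    congr 1
    simp only [List.length_take, List.length_drop]
    unfold pvPos; split_ifs <;> omega

lemma pv_take_drop_cons (l : List Int) (a m : Nat) (ha : a < l.length) :
    (l.drop a).take (m + 1) = l.getD a 0 :: (l.drop (a + 1)).take m := by
  rw [List.getD_eq_getElem _ _ ha, List.drop_eq_getElem_cons ha, List.take_succ_cons]

lemma pv_window (arr : List Int) (L : Nat) (hL : L ≤ arr.length) :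
    (PySem.List.pyRange 0 (L : Int)).map (fun k => PySem.List.pyGetD arr k 0) = arr.take L := by
  rw [PySem.List.pyRange_zero_natCast, List.map_map]
  apply List.ext_getElem
  · simp; omega
  · intro i h1 h2
    simp only [List.getElem_map, List.getElem_range, Function.comp_apply, List.getElem_take,
      PySem.List.pyGetD_natCast]
    rw [List.getD_eq_getElem _ _ (by simp at h1; omega)]

lemma skipI_exit (vis : List Int) (n i : Int) (f : Nat) (hf : f ≠ 0)
    (h : PySem.List.pyGetD vis i 0 = 0) : skipI vis n i f = i := by
  cases f with
  | zero => exact absurd rfl hf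
  | succ f => simp [skipI, h]

lemma skipJ_exit (vis : List Int) (n count j : Int) (f : Nat) (hf : f ≠ 0)
    (h : PySem.List.pyGetD vis j 0 = 0) : skipJ vis n count j f = j := by
  cases f with
  | zero => exact absurd rfl hf
  | succ f => simp [skipJ, h]

lemma loopB_nil (s0 s1 c : Int) : loopB [] s0 s1 c = s0 - s1 := by
  rw [loopB]

lemma loopB_cons (x : Int) (t : List Int) (s0 s1 c : Int) :
    loopB (x :: t) s0 s1 c =
      if t = [] ∨ (x :: t).getLast (List.cons_ne_nil x t) ≥ x then
        loopB (x :: t).dropLast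
          (if c % 2 = 1 then s0 else s0 + (x :: t).getLast (List.cons_ne_nil x t))
          (if c % 2 = 1 then s1 + (x :: t).getLast (List.cons_ne_nil x t) else s1) (c + 1)
      else
        loopB t (if c % 2 = 1 then s0 else s0 + x)
          (if c % 2 = 1 then s1 + x else s1) (c + 1) := by
  rw [loopB]

-- the main induction: A's loop state (vis, i, j) describes the same remaining arc
-- as B's list (e.drop a).take m, and the two loops step in lockstep
lemma pv_loopAB (arr : List Int) (L inx : Nat) (hLle : L ≤ arr.length) (hinx : inx < L) :
    ∀ (m fuel a : Nat) (vis : List Int) (s0 s1 i j : Int),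
      a + m ≤ L - 1 → m ≤ fuel → vis.length = L →
      (∀ t, t < L - 1 →
        vis.getD (pvPos inx L t) 0 = if a ≤ t ∧ t < a + m then 0 else 1) →
      (1 ≤ m → (if i = -1 then (L : Int) - 1 else i) = (pvPos inx L (a + m - 1) : Int)) →
      (1 ≤ m → (if j = (L : Int) then 0 else j) = (pvPos inx L a : Int)) →
      loopA arr L vis s0 s1 ((L : Int) - m) i j fuel
        = loopB ((((arr.drop (inx + 1)).take (L - (inx + 1)) ++ arr.take inx).drop a).take m)
            s0 s1 ((L : Int) - m) := by
  intro m
  induction m with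
  | zero =>
    intro fuel a vis s0 s1 i j hram hfuel hvlen hvis hi hj
    simp only [Nat.cast_zero, sub_zero, List.take_zero, loopB_nil]
    cases fuel with
    | zero => simp [loopA]
    | succ f => simp [loopA]
  | succ m ih =>
    intro fuel a vis s0 s1 i j hram hfuel hvlen hvis hi hj
    obtain ⟨f, rfl⟩ : ∃ f, fuel = f + 1 := ⟨fuel - 1, by omega⟩
    set e := (arr.drop (inx + 1)).take (L - (inx + 1)) ++ arr.take inx with hedef
    have he : e.length = L - 1 := by simp [hedef]; omega
    have hL2 : 2 ≤ L := by omega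
    have hcount : ¬ ((L : Int) - ((m : Int) + 1) = (L : Int)) := by omega
    have hiN : (if i = -1 then (L : Int) - 1 else i) = (pvPos inx L (a + m) : Int) := by
      have := hi (by omega); simpa using this
    have hjN : (if j = (L : Int) then 0 else j) = (pvPos inx L a : Int) := hj (by omega)
    have hvhi : vis.getD (pvPos inx L (a + m)) 0 = 0 := by
      rw [hvis (a + m) (by omega), if_pos ⟨by omega, by omega⟩]
    have hvlo : vis.getD (pvPos inx L a) 0 = 0 := by
      rw [hvis a (by omega), if_pos ⟨by omega, by omega⟩]
    have hskI : skipI vis (L : Int) (pvPos inx L (a + m) : Int) ((L : Int)).toNat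
        = (pvPos inx L (a + m) : Int) := by
      rw [Int.toNat_natCast]
      exact skipI_exit _ _ _ _ (by omega) (by simpa using hvhi)
    have hskJ : skipJ vis (L : Int) ((L : Int) - ((m : Int) + 1)) (pvPos inx L a : Int)
        ((L : Int)).toNat = (pvPos inx L a : Int) := by
      rw [Int.toNat_natCast]
      exact skipJ_exit _ _ _ _ _ (by omega) (by simpa using hvlo)
    have harrhi : PySem.List.pyGetD arr (pvPos inx L (a + m) : Int) 0 = e.getD (a + m) 0 := by
      simp only [PySem.List.pyGetD_natCast]
      exact (pvE_getD arr inx (a + m) L hinx hLle (by omega)).symm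
    have harrlo : PySem.List.pyGetD arr (pvPos inx L a : Int) 0 = e.getD a 0 := by
      simp only [PySem.List.pyGetD_natCast]
      exact (pvE_getD arr inx a L hinx hLle (by omega)).symm
    -- decompose B's list
    have hacons : (e.drop a).take (m + 1) = e.getD a 0 :: (e.drop (a + 1)).take m :=
      pv_take_drop_cons e a m (by omega)
    have htlen : ((e.drop (a + 1)).take m).length = m := by simp; omega
    have hdlen : ((e.drop a).take (m + 1)).length = m + 1 := by simp; omega
    have htnil : ((e.drop (a + 1)).take m = []) ↔ m = 0 := by
      rw [← List.length_eq_zero_iff, htlen]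
    -- one step of loopA
    simp only [loopA, Nat.cast_add, Nat.cast_one, if_neg hcount, hiN, hjN, hskI, hskJ,
      harrhi, harrlo]
    -- one step of loopB
    rw [hacons, loopB_cons]
    have hlast2 : (e.getD a 0 :: (e.drop (a + 1)).take m).getLast (List.cons_ne_nil _ _)
        = e.getD (a + m) 0 := by
      rw [List.getLast_eq_getElem, ← List.getD_eq_getElem _ 0 (by simp)]
      simp only [List.length_cons, Nat.add_sub_cancel, htlen]
      rw [← hacons]
      rw [List.getD_eq_getElem _ _ (by rw [hdlen]; omega), List.getD_eq_getElem _ _ (by omega)]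
      simp only [List.getElem_take, List.getElem_drop]
    rw [hlast2]
    have hcnt1 : ((L : Int) - ((m : Int) + 1) = (L : Int) - 1) ↔ m = 0 := by omega
    have hstep : (L : Int) - ((m : Int) + 1) + 1 = (L : Int) - (m : Int) := by omega
    by_cases hback : e.getD (a + m) 0 ≥ e.getD a 0 ∨ m = 0
    · -- both pick the back element
      rw [if_pos (show e.getD (a + m) 0 ≥ e.getD a 0 ∨ (L : Int) - ((m : Int) + 1) = (L : Int) - 1
        from hback.elim Or.inl (fun h => Or.inr (hcnt1.mpr h)))]
      rw [if_pos (show (e.drop (a + 1)).take m = [] ∨ e.getD (a + m) 0 ≥ e.getD a 0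
        from hback.elim Or.inr (fun h => Or.inl (htnil.mpr h)))]
      have hdl : (e.getD a 0 :: (e.drop (a + 1)).take m).dropLast = (e.drop a).take m := by
        rw [← hacons, List.dropLast_eq_take, hdlen]
        simp [List.take_take]
      rw [hdl]
      simp only [hstep]
      have := ih f a (PySem.List.pySetD vis (pvPos inx L (a + m) : Int) 1)
        (if ((L : Int) - ((m : Int) + 1)) % 2 = 1 then s0 else s0 + e.getD (a + m) 0)
        (if ((L : Int) - ((m : Int) + 1)) % 2 = 1 then s1 + e.getD (a + m) 0 else s1)
        ((pvPos inx L (a + m) : Int) - 1) (pvPos inx L a : Int)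
        (by omega) (by omega)
        (by simp [hvlen])
        (by
          intro t ht
          simp only [PySem.List.pySetD_natCast]
          rw [List.getD_eq_getElem _ _ (by rw [List.length_set, hvlen]; exact pvPos_lt _ _ _ hinx ht)]
          rw [List.getElem_set]
          by_cases hsame : pvPos inx L (a + m) = pvPos inx L t
          · have ht' : t = a + m := pvPos_inj inx L t (a + m) hinx ht (by omega) hsame.symm
            rw [if_pos hsame, ht']
            rw [if_neg (by omega)]
          · rw [if_neg hsame, ← List.getD_eq_getElem _ 0 (by rw [hvlen]; exact pvPos_lt _ _ _ hinx ht)]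
            rw [hvis t ht]
            have htne : t ≠ a + m := fun hh => hsame (hh ▸ rfl)
            by_cases hc : a ≤ t ∧ t < a + m
            · rw [if_pos hc, if_pos ⟨hc.1, by omega⟩]
            · rw [if_neg hc, if_neg (by omega)])
        (by
          intro hm1
          have := pvPos_pred inx L (a + m) hinx (by omega) (by omega)
          simpa using this)
        (by
          intro _
          exact pvPos_id inx L a hinx (by omega))
      have hx : arr.getD (pvPos inx L (a + m)) 0 = e.getD (a + m) 0 :=
        (pvE_getD arr inx (a + m) L hinx hLle (by omega)).symm
      rw [List.getD_eq_getElem?_getD, List.getD_eq_getElem?_getD] at hx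
      simpa [hx] using this
    · -- both pick the front element
      push Not at hback
      obtain ⟨hlt, hm1⟩ := hback
      have hAneg : ¬ (e.getD (a + m) 0 ≥ e.getD a 0 ∨ (L : Int) - ((m : Int) + 1) = (L : Int) - 1) := by
        rintro (h | h)
        · omega
        · omega
      have hBneg : ¬ ((e.drop (a + 1)).take m = [] ∨ e.getD (a + m) 0 ≥ e.getD a 0) := by
        rintro (h | h)
        · exact hm1 (htnil.mp h)
        · omega
      rw [if_neg hAneg, if_neg hBneg]
      simp only [hstep]
      have := ih f (a + 1) (PySem.List.pySetD vis (pvPos inx L a : Int) 1)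
        (if ((L : Int) - ((m : Int) + 1)) % 2 = 1 then s0 else s0 + e.getD a 0)
        (if ((L : Int) - ((m : Int) + 1)) % 2 = 1 then s1 + e.getD a 0 else s1)
        (pvPos inx L (a + m) : Int) ((pvPos inx L a : Int) + 1)
        (by omega) (by omega)
        (by simp [hvlen])
        (by
          intro t ht
          simp only [PySem.List.pySetD_natCast]
          rw [List.getD_eq_getElem _ _ (by rw [List.length_set, hvlen]; exact pvPos_lt _ _ _ hinx ht)]
          rw [List.getElem_set]
          by_cases hsame : pvPos inx L a = pvPos inx L t
          · have ht' : t = a := pvPos_inj inx L t a hinx ht (by omega) hsame.symm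
            rw [if_pos hsame, ht']
            rw [if_neg (by omega)]
          · rw [if_neg hsame, ← List.getD_eq_getElem _ 0 (by rw [hvlen]; exact pvPos_lt _ _ _ hinx ht)]
            rw [hvis t ht]
            have htne : t ≠ a := fun hh => hsame (hh ▸ rfl)
            by_cases hc : a + 1 ≤ t ∧ t < a + 1 + m
            · rw [if_pos ⟨by omega, by omega⟩, if_pos hc]
            · rw [if_neg (by omega), if_neg hc])
        (by
          intro _
          have h1 : a + 1 + m - 1 = a + m := by omega
          rw [h1]
          exact pvPos_nonneg_if inx L (a + m))
        (by
          intro _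
          have := pvPos_succ inx L a hinx (by omega)
          simpa using this)
      have hx : arr.getD (pvPos inx L a) 0 = e.getD a 0 :=
        (pvE_getD arr inx a L hinx hLle (by omega)).symm
      rw [List.getD_eq_getElem?_getD, List.getD_eq_getElem?_getD] at hx
      simpa [hx] using this

theorem solution_eq_alt (arr : List Int) (n : Int) (h : Pre_solution arr n) :
    solution arr n = solution_alt arr n := by
  obtain ⟨hne, hn1, hnle, y, hymem, hymax⟩ := h
  cases hmx : PySem.List.max? arr (fun y => y) with
  | none => exact absurd ((PySem.List.max?_eq_none_iff arr (fun y => y)).mp hmx) hne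
  | some mx =>
  cases hidx : PySem.List.index? arr mx with
  | none =>
    exact absurd (PySem.List.max?_mem hmx) ((PySem.List.index?_eq_none_iff arr mx).mp hidx)
  | some inx =>
  obtain ⟨hinxlen, harrinx, hfirst⟩ := PySem.List.getElem_of_index?_eq_some hidx
  have hmxmax : ∀ x ∈ arr, x ≤ mx := PySem.List.max?_isMax hmx
  have hymx : y = mx :=
    le_antisymm (hmxmax y (List.mem_of_mem_take hymem)) (hymax mx (PySem.List.max?_mem hmx))
  have hlen1 : 0 < arr.length := List.length_pos_iff.mpr hne
  have hnL : n = (n.toNat : Int) := by omega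
  have hLle : n.toNat ≤ arr.length := by omega
  have hmxtake : mx ∈ arr.take n.toNat := hymx ▸ hymem
  obtain ⟨k, hkpf, hkeq⟩ := List.getElem_of_mem hmxtake
  have hkarr : arr[k]'(by simp at hkpf; omega) = mx := by
    simpa [List.getElem_take] using hkeq
  have hinx : inx < n.toNat := by
    by_contra hc'
    exact hfirst k (by simp at hkpf; omega) hkarr
  -- the window w = arr[:n] and its max / index agree with the global ones
  have hw : (PySem.List.pyRange 0 ((n.toNat : Nat) : Int)).map
      (fun k => PySem.List.pyGetD arr k 0) = arr.take n.toNat := pv_window arr n.toNat hLle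
  have hwne : arr.take n.toNat ≠ [] := by
    rw [← List.length_pos_iff, List.length_take]
    omega
  cases hmw : PySem.List.max? (arr.take n.toNat) (fun y => y) with
  | none => exact absurd ((PySem.List.max?_eq_none_iff _ _).mp hmw) hwne
  | some mw =>
  have hmweq : mw = mx := by
    refine le_antisymm (hmxmax mw (List.mem_of_mem_take (PySem.List.max?_mem hmw))) ?_
    exact PySem.List.max?_isMax hmw mx hmxtake
  rw [hmweq] at hmw
  cases hiw : PySem.List.index? (arr.take n.toNat) mx with
  | none =>
    exact absurd hmxtake ((PySem.List.index?_eq_none_iff _ mx).mp hiw)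
  | some iw =>
  obtain ⟨hiwlen, hiweq, hiwfirst⟩ := PySem.List.getElem_of_index?_eq_some hiw
  have hiwlen' : iw < n.toNat := by simp at hiwlen; omega
  have hiwarr : arr[iw]'(by simp at hiwlen; omega) = mx := by
    simpa [List.getElem_take] using hiweq
  have hiwinx : iw = inx := by
    have h1 : ¬ iw < inx := fun hh => hfirst iw hh hiwarr
    have h2 : ¬ inx < iw := fun hh =>
      hiwfirst inx hh (by simpa [List.getElem_take] using harrinx)
    omega
  rw [hiwinx] at hiw
  rw [hnL]
  simp only [solution, solution_alt, Int.toNat_natCast, hmx, hidx, hw, hmw, hiw]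
  rw [show ((inx : Int) + 1) = (((inx + 1 : Nat)) : Int) from by push_cast; ring]
  rw [PySem.List.slice_from_natCast, PySem.List.slice_to_natCast, PySem.List.pySetD_natCast]
  rw [List.drop_take, List.take_take, Nat.min_eq_left (Nat.le_of_lt hinx)]
  have key := pv_loopAB arr n.toNat inx hLle hinx (n.toNat - 1) n.toNat 0
    ((List.replicate n.toNat (0 : Int)).set inx 1) mx 0 ((inx : Int) - 1) (((inx + 1 : Nat)) : Int)
    (by omega) (by omega) (by simp)
    (by
      intro t ht
      rw [List.getD_eq_getElem _ _
        (by rw [List.length_set, List.length_replicate]; exact pvPos_lt _ _ _ hinx ht)]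
      rw [List.getElem_set]
      rw [if_neg (fun hh => pvPos_ne inx n.toNat t hinx ht hh.symm)]
      rw [List.getElem_replicate, if_pos ⟨Nat.zero_le _, by omega⟩])
    (by
      intro hm
      show (if (inx : Int) - 1 = -1 then (n.toNat : Int) - 1 else (inx : Int) - 1)
        = ((pvPos inx n.toNat (0 + (n.toNat - 1) - 1) : Nat) : Int)
      unfold pvPos; split_ifs <;> omega)
    (by
      intro hm
      show (if (((inx + 1 : Nat)) : Int) = (n.toNat : Int) then 0 else (((inx + 1 : Nat)) : Int))
        = ((pvPos inx n.toNat 0 : Nat) : Int)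
      unfold pvPos; split_ifs <;> omega)
  have hc : (n.toNat : Int) - ((n.toNat - 1 : Nat) : Int) = 1 := by omega
  rw [hc] at key
  rw [List.drop_zero] at key
  rw [show n.toNat - 1
      = ((arr.drop (inx + 1)).take (n.toNat - (inx + 1)) ++ arr.take inx).length from by
        simp; omega,
    List.take_length] at key
  exact key

-- ===== VERDICT (by name: the statement is the Claim_ definition above) =====
theorem solution_spec : Claim_equal_solution := by
  intro arr n _ hpre
  exact solution_eq_alt arr n hpre
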